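-- pv_equiv track=rewrite | github.com/self-798/CHUKSZ_CSC3100_coding | HW2/A2_P1_123090233.py | initialize_count_and_index_map
-- ===== SOURCE A (Python) =====
-- def initialize_count_and_index_map(n, A):
--     '''
--     Initializes the count and index_map arrays.
--
--     Input:
--     - n: The maximum value that can appear in A.
--     - A: List of integers representing the sequence.
--
--     Output:
--     - count: List of integers where count[i] represents the number of occurrences of i in A.
--     - index_map: A list of lists where each inner list stores the indices of occurrences of each number in A.
--     '''
--     count = [0] * (n + 1)
--     index_map = [[] for _ in range(n + 1)]
--
--     # Traverse A to update count and index_map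
--     for i, num in enumerate(A):
--         if num <= n:
--             count[num] += 1
--             index_map[num].append(i)
--
--     return count, index_map
-- ===== SOURCE B (Python) =====
-- def initialize_count_and_index_map(n, A):
--     # Counting-sort style: tally occurrences first, then preallocate every
--     # bucket at its exact final size and fill it with a per-bucket write cursor.
--     count = [0] * (n + 1)
--     for num in A:
--         if num <= n:
--             count[num] += 1
--     index_map = [[0] * c for c in count]
--     cursor = [0] * (n + 1)
--     for i, num in enumerate(A):
--         if num <= n:
--             index_map[num][cursor[num]] = i
--             cursor[num] += 1
--     return count, index_map
-- ===== Notes on version B (the rewrite author's own statement) =====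
-- stated objective: alternative
-- what changed: B replaces A's single pass with growing buckets by a counting-sort style two-phase scheme: a first pass tallies occurrences, each bucket is preallocated at its exact final size, and a second pass fills the buckets through per-bucket write cursors.
import Mathlib
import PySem

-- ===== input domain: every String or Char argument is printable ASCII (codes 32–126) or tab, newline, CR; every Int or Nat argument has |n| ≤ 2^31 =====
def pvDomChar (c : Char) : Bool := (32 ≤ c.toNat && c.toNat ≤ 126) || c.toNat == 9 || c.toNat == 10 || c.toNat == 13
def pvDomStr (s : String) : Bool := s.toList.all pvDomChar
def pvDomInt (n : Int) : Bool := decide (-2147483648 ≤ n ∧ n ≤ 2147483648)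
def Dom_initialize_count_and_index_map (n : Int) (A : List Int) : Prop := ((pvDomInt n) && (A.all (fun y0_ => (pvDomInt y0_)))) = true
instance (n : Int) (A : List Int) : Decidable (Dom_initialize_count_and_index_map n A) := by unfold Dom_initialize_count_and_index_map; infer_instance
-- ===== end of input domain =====

-- B is a counting-sort style two-phase re-implementation (tally, preallocate exact-size buckets,
-- fill via write cursors) with the same return value as A wherever A returns; A mutates nothing.

-- ===== PORT A =====
def initialize_count_and_index_map (n : Int) (A : List Int) : List Int × List (List Int) :=
  let count : List Int := List.replicate (n + 1).toNat 0
  let index_map : List (List Int) := (PySem.List.pyRange 0 (n + 1) 1).map (fun _ => [])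
  (PySem.List.enumerate A).foldl
    (fun (s : List Int × List (List Int)) p =>
      if p.2 ≤ n then
        (PySem.List.pySetD s.1 p.2 (PySem.List.pyGetD s.1 p.2 0 + 1),
         PySem.List.pySetD s.2 p.2 (PySem.List.pyGetD s.2 p.2 [] ++ [p.1]))
      else s)
    (count, index_map)

-- ===== PORT B =====
def initialize_count_and_index_map_alt (n : Int) (A : List Int) : List Int × List (List Int) :=
  let count : List Int :=
    A.foldl
      (fun c num =>
        if num ≤ n then PySem.List.pySetD c num (PySem.List.pyGetD c num 0 + 1) else c)
      (List.replicate (n + 1).toNat 0)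
  let index_map0 : List (List Int) := count.map (fun c => List.replicate c.toNat (0 : Int))
  let cursor0 : List Int := List.replicate (n + 1).toNat 0
  let s :=
    (PySem.List.enumerate A).foldl
      (fun (s : List (List Int) × List Int) p =>
        if p.2 ≤ n then
          (PySem.List.pySetD s.1 p.2
             (PySem.List.pySetD (PySem.List.pyGetD s.1 p.2 []) (PySem.List.pyGetD s.2 p.2 0) p.1),
           PySem.List.pySetD s.2 p.2 (PySem.List.pyGetD s.2 p.2 0 + 1))
        else s)
      (index_map0, cursor0)
  (count, s.1)

-- ===== PRECONDITION & SPEC =====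
-- Pre_ excludes exactly the inputs on which Python A raises IndexError (an element num ≤ n whose
-- negative index falls outside the n+1-sized arrays, or n < 0 with some element ≤ n); Python B
-- raises identically there, so nothing A returns on is excluded.
def Pre_initialize_count_and_index_map (n : Int) (A : List Int) : Prop :=
  ∀ x ∈ A, x ≤ n → (0 ≤ n ∧ -(n + 1) ≤ x)
instance (n : Int) (A : List Int) : Decidable (Pre_initialize_count_and_index_map n A) := by
  unfold Pre_initialize_count_and_index_map; infer_instance
def pvWitness_initialize_count_and_index_map : Int × List Int := (3, [0, 2, 2, 7, 1])
def Spec_initialize_count_and_index_map (n : Int) (A : List Int) (out : List Int × List (List Int)) : Prop := out = initialize_count_and_index_map_alt n A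
instance (n : Int) (A : List Int) (out : List Int × List (List Int)) : Decidable (Spec_initialize_count_and_index_map n A out) := by unfold Spec_initialize_count_and_index_map; infer_instance

-- ===== CLAIM (what is proved, stated in full; the proofs are below) =====
def Claim_equal_initialize_count_and_index_map : Prop := ∀ (n : Int) (A : List Int), Dom_initialize_count_and_index_map n A → Pre_initialize_count_and_index_map n A → Spec_initialize_count_and_index_map n A (initialize_count_and_index_map n A)

-- ===== LEMMAS AND PROOFS =====

-- Python's index resolution for an in-range (possibly negative) index, as a Nat
def pvEidx (m : Nat) (i : Int) : Nat := (if i < 0 then i + m else i).toNat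

-- the loop-step functions of the two programs, named for the proofs
def pvCntStep (n : Int) (c : List Int) (x : Int) : List Int :=
  if x ≤ n then PySem.List.pySetD c x (PySem.List.pyGetD c x 0 + 1) else c
def pvImStep (n : Int) (im : List (List Int)) (p : Int × Int) : List (List Int) :=
  if p.2 ≤ n then PySem.List.pySetD im p.2 (PySem.List.pyGetD im p.2 [] ++ [p.1]) else im
def pvPlaceStep (n : Int) (s : List (List Int) × List Int) (p : Int × Int) :
    List (List Int) × List Int :=
  if p.2 ≤ n then
    (PySem.List.pySetD s.1 p.2
       (PySem.List.pySetD (PySem.List.pyGetD s.1 p.2 []) (PySem.List.pyGetD s.2 p.2 0) p.1),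
     PySem.List.pySetD s.2 p.2 (PySem.List.pyGetD s.2 p.2 0 + 1))
  else s
def pvLenz (b : List Int) : Int := b.length
def pvOcc (n : Int) (m : Nat) (j : Nat) (xs : List Int) : Nat :=
  xs.countP (fun x => decide (x ≤ n) && (pvEidx m x == j))

theorem pvEidx_lt {m : Nat} {i : Int} (h0 : -(m : Int) ≤ i) (h1 : i < (m : Int)) :
    pvEidx m i < m := by
  unfold pvEidx; split_ifs <;> omega

theorem pvIdx_eq {m : Nat} {i : Int} (h0 : -(m : Int) ≤ i) (h1 : i < (m : Int)) :
    PySem.List.pyIdx? m i = some (pvEidx m i) := by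
  unfold PySem.List.pyIdx? pvEidx
  rcases lt_or_ge i 0 with hi | hi
  · rw [if_neg (by omega), if_pos (by omega), if_pos hi]
    congr 1; omega
  · rw [if_pos (by omega), if_pos (by omega), if_neg (by omega)]

theorem pvGetD_eidx {α : Type} (xs : List α) (i : Int) (d : α)
    (h0 : -(xs.length : Int) ≤ i) (h1 : i < (xs.length : Int)) :
    PySem.List.pyGetD xs i d = xs.getD (pvEidx xs.length i) d := by
  have he := pvEidx_lt h0 h1
  rw [List.getD_eq_getElem _ _ he]
  simp [PySem.List.pyGetD, PySem.List.pyGet?, pvIdx_eq h0 h1, List.getElem?_eq_getElem he]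

theorem pvSetD_eidx {α : Type} (xs : List α) (i : Int) (v : α)
    (h0 : -(xs.length : Int) ≤ i) (h1 : i < (xs.length : Int)) :
    PySem.List.pySetD xs i v = xs.set (pvEidx xs.length i) v := by
  simp [PySem.List.pySetD, PySem.List.pySet?, pvIdx_eq h0 h1]

theorem pvGetD_set {α : Type} {l : List α} {e j : Nat} (v d : α)
    (hj : j < l.length) (he : e < l.length) :
    (l.set e v).getD j d = if j = e then v else l.getD j d := by
  rw [List.getD_eq_getElem _ _ (by simpa using hj), List.getD_eq_getElem _ _ hj]
  by_cases h : j = e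
  · subst h; simp
  · rw [List.getElem_set_ne (Ne.symm h)]; simp [h]

theorem pvGetD_map {α β : Type} (f : α → β) (l : List α) (j : Nat) (d : β)
    (hj : j < l.length) : (l.map f).getD j d = f l[j] := by
  rw [List.getD_eq_getElem _ _ (by simpa using hj)]; simp

-- count pass: after the fold, slot j holds its old value plus the number of elements resolving to j
theorem pvCnt_invariant (n : Int) (m : Nat) :
    ∀ (xs : List Int) (c : List Int), c.length = m →
      (∀ x ∈ xs, x ≤ n → (-(m : Int) ≤ x ∧ x < (m : Int))) →
      (xs.foldl (pvCntStep n) c).length = m ∧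
      ∀ j, j < m →
        (xs.foldl (pvCntStep n) c).getD j 0 = c.getD j 0 + (pvOcc n m j xs : Int) := by
  intro xs
  induction xs with
  | nil => intro c hc _; exact ⟨hc, fun j _ => by simp [pvOcc]⟩
  | cons x xs ih =>
    intro c hc hb
    by_cases hx : x ≤ n
    · obtain ⟨hb0, hb1⟩ := hb x List.mem_cons_self hx
      have he : pvEidx m x < m := pvEidx_lt hb0 hb1
      have hstep : pvCntStep n c x = c.set (pvEidx m x) (c.getD (pvEidx m x) 0 + 1) := by
        unfold pvCntStep
        rw [if_pos hx, pvSetD_eidx c x _ (by omega) (by omega),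
            pvGetD_eidx c x 0 (by omega) (by omega), hc]
      have ih' := ih (c.set (pvEidx m x) (c.getD (pvEidx m x) 0 + 1))
        (by simpa using hc) (fun y hy => hb y (List.mem_cons_of_mem _ hy))
      refine ⟨by simpa [hstep] using ih'.1, fun j hj => ?_⟩
      rw [List.foldl_cons, hstep, ih'.2 j hj,
          pvGetD_set _ _ (by omega) (by omega)]
      by_cases hje : j = pvEidx m x
      · subst hje
        simp [pvOcc, hx]
        omega
      · have : (decide (x ≤ n) && (pvEidx m x == j)) = false := by
          simp [hx]; exact fun h => hje h.symm
        simp [pvOcc, this]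
        omega
    · have hstep : pvCntStep n c x = c := by unfold pvCntStep; rw [if_neg hx]
      have ih' := ih c hc (fun y hy => hb y (List.mem_cons_of_mem _ hy))
      refine ⟨by simpa [hstep] using ih'.1, fun j hj => ?_⟩
      rw [List.foldl_cons, hstep, ih'.2 j hj]
      simp [pvOcc, hx]

-- placement pass: B's cursor fold tracks A's bucket fold, each B-bucket being the A-bucket
-- padded with the zeros still to be overwritten
theorem pvPlace_invariant (n : Int) (m : Nat) :
    ∀ (ps : List (Int × Int)) (im im' cur : _),
      im.length = m → im'.length = m →
      (∀ p ∈ ps, p.2 ≤ n → (-(m : Int) ≤ p.2 ∧ p.2 < (m : Int))) →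
      cur = im.map pvLenz →
      (∀ j, j < m →
        im'.getD j [] = im.getD j [] ++ List.replicate (pvOcc n m j (ps.map (·.2))) (0 : Int)) →
      ps.foldl (pvPlaceStep n) (im', cur) =
        (ps.foldl (pvImStep n) im, (ps.foldl (pvImStep n) im).map pvLenz) := by
  intro ps
  induction ps with
  | nil =>
    intro im im' cur him him' _ hcur hpt
    simp only [List.foldl_nil]
    have him'' : im' = im := by
      apply List.ext_getElem (by omega)
      intro i h1 h2
      have h := hpt i (by omega)
      simp only [List.map_nil, pvOcc, List.countP_nil, List.replicate_zero,
        List.append_nil] at h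
      rwa [List.getD_eq_getElem _ _ h1, List.getD_eq_getElem _ _ h2] at h
    rw [him'', hcur]
  | cons p ps ih =>
    intro im im' cur him him' hb hcur hpt
    subst hcur
    have hb2 : ∀ q ∈ ps, q.2 ≤ n → (-(m : Int) ≤ q.2 ∧ q.2 < (m : Int)) :=
      fun q hq => hb q (List.mem_cons_of_mem _ hq)
    by_cases hx : p.2 ≤ n
    · obtain ⟨hb0, hb1⟩ := hb p List.mem_cons_self hx
      have he : pvEidx m p.2 < m := pvEidx_lt hb0 hb1
      have him_e : pvEidx m p.2 < im.length := by omega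
      have him'_e : pvEidx m p.2 < im'.length := by omega
      -- A's step writes the new index at the end of the bucket
      have hstepA : pvImStep n im p
          = im.set (pvEidx m p.2) (im.getD (pvEidx m p.2) [] ++ [p.1]) := by
        unfold pvImStep
        rw [if_pos hx, pvSetD_eidx im p.2 _ (by omega) (by omega),
            pvGetD_eidx im p.2 [] (by omega) (by omega), him]
      -- the cursor read is the current length of A's bucket
      have hcur0 : PySem.List.pyGetD (im.map pvLenz) p.2 0
          = ((im.getD (pvEidx m p.2) []).length : Int) := by
        rw [pvGetD_eidx (im.map pvLenz) p.2 0 (by simp; omega) (by simp; omega)]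
        simp only [List.length_map, him]
        rw [pvGetD_map pvLenz im (pvEidx m p.2) 0 him_e,
            List.getD_eq_getElem _ _ him_e]
        rfl
      have hocc : pvOcc n m (pvEidx m p.2) ((p :: ps).map (·.2))
          = pvOcc n m (pvEidx m p.2) (ps.map (·.2)) + 1 := by
        simp [pvOcc, hx]
      -- B's inner bucket before the write
      have hinner : PySem.List.pyGetD im' p.2 []
          = im.getD (pvEidx m p.2) []
              ++ List.replicate (pvOcc n m (pvEidx m p.2) (ps.map (·.2)) + 1) (0 : Int) := by
        rw [pvGetD_eidx im' p.2 [] (by omega) (by omega), him',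
            hpt (pvEidx m p.2) he, hocc]
      -- B's inner write overwrites the first padding zero
      have hinnerset : PySem.List.pySetD
            (im.getD (pvEidx m p.2) []
              ++ List.replicate (pvOcc n m (pvEidx m p.2) (ps.map (·.2)) + 1) (0 : Int))
            ((im.getD (pvEidx m p.2) []).length : Int) p.1
          = (im.getD (pvEidx m p.2) [] ++ [p.1])
              ++ List.replicate (pvOcc n m (pvEidx m p.2) (ps.map (·.2))) (0 : Int) := by
        rw [PySem.List.pySetD_of_nonneg _ _ (Int.natCast_nonneg _)]
        rw [Int.toNat_natCast, List.set_append_right _ _ (le_refl _)]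
        simp [List.replicate_succ]
      -- B's step, assembled
      have hstepB : pvPlaceStep n (im', im.map pvLenz) p
          = (im'.set (pvEidx m p.2)
               ((im.getD (pvEidx m p.2) [] ++ [p.1])
                 ++ List.replicate (pvOcc n m (pvEidx m p.2) (ps.map (·.2))) (0 : Int)),
             (im.map pvLenz).set (pvEidx m p.2)
               (((im.getD (pvEidx m p.2) []).length : Int) + 1)) := by
        unfold pvPlaceStep
        rw [if_pos hx]
        have hc1 : PySem.List.pySetD im' p.2
              (PySem.List.pySetD (PySem.List.pyGetD im' p.2 [])
                (PySem.List.pyGetD (im.map pvLenz) p.2 0) p.1)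
            = im'.set (pvEidx m p.2)
               ((im.getD (pvEidx m p.2) [] ++ [p.1])
                 ++ List.replicate (pvOcc n m (pvEidx m p.2) (ps.map (·.2))) (0 : Int)) := by
          rw [hcur0, hinner, hinnerset,
              pvSetD_eidx im' p.2 _ (by omega) (by omega), him']
        have hc2 : PySem.List.pySetD (im.map pvLenz) p.2
              (PySem.List.pyGetD (im.map pvLenz) p.2 0 + 1)
            = (im.map pvLenz).set (pvEidx m p.2)
               (((im.getD (pvEidx m p.2) []).length : Int) + 1) := by
          rw [hcur0, pvSetD_eidx (im.map pvLenz) p.2 _ (by simp; omega) (by simp; omega)]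
          simp only [List.length_map, him]
        rw [hc1, hc2]
      -- the invariant is preserved, apply the induction hypothesis
      have hcur2 : (im.map pvLenz).set (pvEidx m p.2)
            (((im.getD (pvEidx m p.2) []).length : Int) + 1)
          = (im.set (pvEidx m p.2) (im.getD (pvEidx m p.2) [] ++ [p.1])).map pvLenz := by
        rw [List.map_set]
        simp [pvLenz]
      have hpt2 : ∀ j, j < m →
          (im'.set (pvEidx m p.2)
             ((im.getD (pvEidx m p.2) [] ++ [p.1])
               ++ List.replicate (pvOcc n m (pvEidx m p.2) (ps.map (·.2))) (0 : Int))).getD j []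
          = (im.set (pvEidx m p.2) (im.getD (pvEidx m p.2) [] ++ [p.1])).getD j []
              ++ List.replicate (pvOcc n m j (ps.map (·.2))) (0 : Int) := by
        intro j hj
        rw [pvGetD_set _ _ (by omega) (by omega), pvGetD_set _ _ (by omega) (by omega)]
        by_cases hje : j = pvEidx m p.2
        · subst hje
          simp
        · have hpfalse : (decide (p.2 ≤ n) && (pvEidx m p.2 == j)) = false := by
            simp [hx]; exact fun h => hje h.symm
          have hoccj : pvOcc n m j ((p :: ps).map (·.2)) = pvOcc n m j (ps.map (·.2)) := by
            simp [pvOcc, hpfalse]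
          rw [if_neg hje, if_neg hje, hpt j hj, hoccj]
      have ihap := ih (im.set (pvEidx m p.2) (im.getD (pvEidx m p.2) [] ++ [p.1]))
        (im'.set (pvEidx m p.2)
          ((im.getD (pvEidx m p.2) [] ++ [p.1])
            ++ List.replicate (pvOcc n m (pvEidx m p.2) (ps.map (·.2))) (0 : Int)))
        ((im.map pvLenz).set (pvEidx m p.2)
          (((im.getD (pvEidx m p.2) []).length : Int) + 1))
        (by simpa using him) (by simpa using him') hb2 hcur2 hpt2
      simp only [List.foldl_cons]
      rw [hstepB, hstepA]
      exact ihap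
    · have hstepA : pvImStep n im p = im := by unfold pvImStep; rw [if_neg hx]
      have hstepB : pvPlaceStep n (im', im.map pvLenz) p = (im', im.map pvLenz) := by
        unfold pvPlaceStep; rw [if_neg hx]
      have hpt2 : ∀ j, j < m →
          im'.getD j [] = im.getD j []
            ++ List.replicate (pvOcc n m j (ps.map (·.2))) (0 : Int) := by
        intro j hj
        have hoccj : pvOcc n m j ((p :: ps).map (·.2)) = pvOcc n m j (ps.map (·.2)) := by
          simp [pvOcc, hx]
        rw [hpt j hj, hoccj]
      simp only [List.foldl_cons]
      rw [hstepB, hstepA]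
      exact ih im im' (im.map pvLenz) him him' hb2 rfl hpt2

theorem initialize_count_and_index_map_spec : Claim_equal_initialize_count_and_index_map := by
  intro n A _ hpre
  unfold Spec_initialize_count_and_index_map initialize_count_and_index_map
    initialize_count_and_index_map_alt
  simp only []
  have hbA : ∀ x ∈ A, x ≤ n → (-(((n + 1).toNat : Nat) : Int) ≤ x ∧ x < (((n + 1).toNat : Nat) : Int)) := by
    intro x hx hxn
    obtain ⟨hn0, hge⟩ := hpre x hx hxn
    have hc : ((((n + 1).toNat : Nat)) : Int) = n + 1 := Int.toNat_of_nonneg (by omega)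
    omega
  have hbP : ∀ p ∈ PySem.List.enumerate A, p.2 ≤ n →
      (-(((n + 1).toNat : Nat) : Int) ≤ p.2 ∧ p.2 < (((n + 1).toNat : Nat) : Int)) := by
    intro p hp hpn
    have hmem : p.2 ∈ A := by
      have h := List.mem_map_of_mem (f := fun q : Int × Int => q.2) hp
      rwa [PySem.List.map_snd_enumerate] at h
    exact hbA p.2 hmem hpn
  -- A's single pair-state fold is a pair of independent folds
  have hlamA : (fun (s : List Int × List (List Int)) (p : Int × Int) =>
      if p.2 ≤ n then
        (PySem.List.pySetD s.1 p.2 (PySem.List.pyGetD s.1 p.2 0 + 1),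
         PySem.List.pySetD s.2 p.2 (PySem.List.pyGetD s.2 p.2 [] ++ [p.1]))
      else s)
      = (fun (s : List Int × List (List Int)) (p : Int × Int) =>
          ((fun (c : List Int) (q : Int × Int) => pvCntStep n c q.2) s.1 p, pvImStep n s.2 p)) := by
    funext s p; simp only [pvCntStep, pvImStep]; split_ifs <;> rfl
  rw [hlamA, PySem.List.foldl_prod_mk (fun c q => pvCntStep n c q.2) (pvImStep n)]
  -- the two count folds agree
  have hcnt_eq : List.foldl (fun c q => pvCntStep n c q.2) (List.replicate (n + 1).toNat 0)
        (PySem.List.enumerate A)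
      = List.foldl (pvCntStep n) (List.replicate (n + 1).toNat 0) A := by
    conv_rhs => rw [← PySem.List.map_snd_enumerate A 0, List.foldl_map]
  have hlamB : (fun (c : List Int) (num : Int) =>
      if num ≤ n then PySem.List.pySetD c num (PySem.List.pyGetD c num 0 + 1) else c)
      = pvCntStep n := by
    funext c num; unfold pvCntStep; rfl
  rw [hcnt_eq, hlamB]
  have hcnt := pvCnt_invariant n (n + 1).toNat A (List.replicate (n + 1).toNat 0) (by simp) hbA
  -- initial states of the placement fold satisfy the invariant
  have him0len : ((PySem.List.pyRange 0 (n + 1) 1).map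
      (fun _ => ([] : List Int))).length = (n + 1).toNat := by
    simp [PySem.List.length_pyRange_one]
  have hcur0 : List.replicate (n + 1).toNat (0 : Int)
      = ((PySem.List.pyRange 0 (n + 1) 1).map (fun _ => ([] : List Int))).map pvLenz := by
    rw [List.map_map]
    have hcomp : (pvLenz ∘ fun _ : Int => ([] : List Int)) = fun _ => (0 : Int) := rfl
    rw [hcomp, List.map_const', PySem.List.length_pyRange_one]
    simp
  have hpt0 : ∀ j, j < (n + 1).toNat →
      (((List.foldl (pvCntStep n) (List.replicate (n + 1).toNat 0) A).map
          (fun c => List.replicate c.toNat (0 : Int)))).getD j []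
      = ((PySem.List.pyRange 0 (n + 1) 1).map (fun _ => ([] : List Int))).getD j []
          ++ List.replicate
              (pvOcc n (n + 1).toNat j ((PySem.List.enumerate A).map (·.2))) (0 : Int) := by
    intro j hj
    rw [PySem.List.map_snd_enumerate]
    have hjc : j < (List.foldl (pvCntStep n) (List.replicate (n + 1).toNat 0) A).length := by
      rw [hcnt.1]; exact hj
    rw [pvGetD_map _ _ j [] hjc]
    have hcv : (List.foldl (pvCntStep n) (List.replicate (n + 1).toNat 0) A).getD j 0
        = (pvOcc n (n + 1).toNat j A : Int) := by
      rw [hcnt.2 j hj]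
      simp
    rw [List.getD_eq_getElem _ _ hjc] at hcv
    rw [hcv, Int.toNat_natCast]
    have hz : ((PySem.List.pyRange 0 (n + 1) 1).map (fun _ => ([] : List Int))).getD j []
        = [] := by
      rw [pvGetD_map _ _ j [] (by rw [PySem.List.length_pyRange_one]; simpa using hj)]
    rw [hz]
    simp
  -- lambda of B's placement fold is pvPlaceStep
  have hlamP : (fun (s : List (List Int) × List Int) (p : Int × Int) =>
      if p.2 ≤ n then
        (PySem.List.pySetD s.1 p.2
           (PySem.List.pySetD (PySem.List.pyGetD s.1 p.2 []) (PySem.List.pyGetD s.2 p.2 0) p.1),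
         PySem.List.pySetD s.2 p.2 (PySem.List.pyGetD s.2 p.2 0 + 1))
      else s) = pvPlaceStep n := by
    funext s p; unfold pvPlaceStep; rfl
  rw [hlamP]
  rw [pvPlace_invariant n (n + 1).toNat (PySem.List.enumerate A)
      ((PySem.List.pyRange 0 (n + 1) 1).map (fun _ => ([] : List Int)))
      ((List.foldl (pvCntStep n) (List.replicate (n + 1).toNat 0) A).map
        (fun c => List.replicate c.toNat (0 : Int)))
      (List.replicate (n + 1).toNat 0)
      him0len (by rw [List.length_map, hcnt.1]) hbP hcur0 hpt0]
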